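-- pv_equiv track=rewrite | github.com/RyanDoyle6088/Scrabble | Scrabble.py | generate_words
-- ===== SOURCE A (Python) =====
-- import itertools
--
-- def generate_words(combo,scrabble_words_dict):
--     """
--     This function takes a list of characters from the input combo and finds all permutations
--     of the characters.  However, only those permutations that are valid English words are added
--     to an empty set we create. The dictionary we created by reading the file is the second parameter,
--     scrabble_words_dict. This is the dictionary of the 3000 words. We then use the permutation function
--     given by Python to find these words and add them to the set, then return the set.
--     """
--     set_words=set()
--     #Need empty set
--     for value in combo:
--         for w in itertools.permutations(value):
--             #Use the given Python function to take the input and permutate it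
--             word=''.join(w)
--             #Must create the word using this, join the permutated string to an empty string
--             if word in scrabble_words_dict:
--                 #If this word we generated is in the 3000 word dictionary, we add it to the set
--                 set_words.add(word)
--     return set_words
-- ===== SOURCE B (Python) =====
-- def _distinct_perms(s):
--     # every distinct rearrangement of s exactly once, branching only on the
--     # first occurrence of each character
--     if not s:
--         return ['']
--     out = []
--     for i in range(len(s)):
--         c = s[i]
--         if c not in s[:i]:
--             for rest in _distinct_perms(s[:i] + s[i + 1:]):
--                 out.append(c + rest)
--     return out
--
--
-- def generate_words(combo, scrabble_words_dict):
--     sigs = set()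
--     for key in scrabble_words_dict:
--         sigs.add(''.join(sorted(key)))
--     set_words = set()
--     for value in combo:
--         if ''.join(sorted(value)) in sigs:
--             for word in _distinct_perms(value):
--                 if word in scrabble_words_dict:
--                     set_words.add(word)
--     return set_words
-- ===== Notes on version B (the rewrite author's own statement) =====
-- stated objective: faster
-- what changed: B precomputes the set of sorted-letter signatures of the dictionary keys and skips every combo value whose signature matches no key, and for the remaining values generates each distinct rearrangement exactly once by a recursion branching on first character occurrences, instead of enumerating all len(value)! itertools permutations of every value and deduplicating repeats through the set.
import Mathlib
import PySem

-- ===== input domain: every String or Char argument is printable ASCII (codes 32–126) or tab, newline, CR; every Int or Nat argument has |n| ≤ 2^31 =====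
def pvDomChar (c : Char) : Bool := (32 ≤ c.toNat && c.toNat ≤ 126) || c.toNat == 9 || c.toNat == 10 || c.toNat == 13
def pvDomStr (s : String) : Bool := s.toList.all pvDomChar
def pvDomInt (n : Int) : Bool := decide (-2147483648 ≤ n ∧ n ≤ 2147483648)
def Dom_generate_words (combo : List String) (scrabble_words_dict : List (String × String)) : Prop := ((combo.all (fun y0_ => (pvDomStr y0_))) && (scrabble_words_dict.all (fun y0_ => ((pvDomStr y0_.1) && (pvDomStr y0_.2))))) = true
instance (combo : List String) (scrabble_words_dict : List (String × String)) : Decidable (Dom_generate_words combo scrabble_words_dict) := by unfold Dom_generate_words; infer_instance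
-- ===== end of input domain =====

-- B first skips any combo value whose sorted-letter signature matches no dictionary
-- key, and for the remaining values replaces A's enumeration of all len(value)!
-- permutations (dedup'd through the set) by a recursion emitting each distinct
-- rearrangement exactly once; the returned set is proved equal including insertion order.

-- ===== PORT A =====
def generate_words (combo : List String) (scrabble_words_dict : List (String × String)) : List String :=
  combo.foldl
    (fun set_words value =>
      -- for w in itertools.permutations(value)
      (PySem.List.permutations value.toList value.toList.length).foldl
        (fun set_words w =>
          -- ''.join(w) for a tuple of single characters is exactly String.ofList w
          let word := String.ofList w
          if PySem.Dict.contains (PySem.Dict.mk scrabble_words_dict) word then PySem.Set.add set_words word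
          else set_words)
        set_words)
    PySem.Set.empty

-- ===== PORT B =====
-- ''.join(sorted(s)) — the sorted-letter signature
def sigOfChars (xs : List Char) : String := String.ofList (PySem.List.sorted xs (fun c => c) false)
def sigOf (s : String) : String := sigOfChars s.toList

-- helper _distinct_perms from Source B; s[:i] + s[i+1:] = eraseIdx i (exact, i < len),
-- and s[i] = getD i ' ' (exact, i < len, so the default is never used)
def distinctPerms (chars : List Char) : List (List Char) :=
  if chars.isEmpty then [[]]
  else
    (List.range chars.length).attach.foldl
      (fun out i =>
        let c := chars.getD i.1 ' '
        if c ∈ chars.take i.1 then out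
        else out ++ (distinctPerms (chars.eraseIdx i.1)).map (c :: ·))
      []
termination_by chars.length
decreasing_by
  have hi : i.1 < chars.length := List.mem_range.mp i.2
  simp [List.length_eraseIdx, hi]
  omega

def generate_words_alt (combo : List String) (scrabble_words_dict : List (String × String)) : List String :=
  let sigs := scrabble_words_dict.foldl
    (fun sigs kv => PySem.Set.add sigs (sigOf kv.1)) PySem.Set.empty
  combo.foldl
    (fun set_words value =>
      if PySem.Set.contains sigs (sigOf value) then
        (distinctPerms value.toList).foldl
          (fun set_words w =>
            let word := String.ofList w
            if PySem.Dict.contains (PySem.Dict.mk scrabble_words_dict) word then PySem.Set.add set_words word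
            else set_words)
          set_words
      else set_words)
    PySem.Set.empty

-- ===== PRECONDITION & SPEC =====
def Spec_generate_words (combo : List String) (scrabble_words_dict : List (String × String)) (out : List String) : Prop := out = generate_words_alt combo scrabble_words_dict
instance (combo : List String) (scrabble_words_dict : List (String × String)) (out : List String) : Decidable (Spec_generate_words combo scrabble_words_dict out) := by unfold Spec_generate_words; infer_instance

-- ===== CLAIM (what is proved, stated in full; the proofs are below) =====
def Claim_equal_generate_words : Prop := ∀ (combo : List String) (scrabble_words_dict : List (String × String)), Dom_generate_words combo scrabble_words_dict → Spec_generate_words combo scrabble_words_dict (generate_words combo scrabble_words_dict)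

-- ===== LEMMAS AND PROOFS =====

-- folding `add s x` over a deduplicated list is folding it over the list itself
theorem update_ofList {α : Type} [BEq α] [LawfulBEq α] (s : PySem.Set α) (l : List α) :
    PySem.Set.update s (PySem.Set.ofList l) = PySem.Set.update s l := by
  rw [PySem.Set.update_eq_append_filter, PySem.Set.update_eq_append_filter, PySem.Set.ofList_ofList]

-- set(map f xs) = map f (set(xs)) for injective f
theorem ofList_map_inj {α β : Type} [BEq α] [LawfulBEq α] [BEq β] [LawfulBEq β]
    (f : α → β) (hf : Function.Injective f) (l : List α) :
    PySem.Set.ofList (l.map f) = (PySem.Set.ofList l).map f := by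
  induction l using List.reverseRecOn with
  | nil => simp
  | append_singleton l x ih =>
      rw [List.map_append, List.map_singleton, PySem.Set.ofList_append_singleton,
        PySem.Set.ofList_append_singleton, ih]
      by_cases hx : x ∈ PySem.Set.ofList l
      · rw [PySem.Set.add_of_mem hx, PySem.Set.add_of_mem]
        exact List.mem_map_of_mem hx
      · rw [PySem.Set.add_of_not_mem hx, PySem.Set.add_of_not_mem, List.map_append,
          List.map_singleton]
        intro hmem
        obtain ⟨a, ha, hfa⟩ := List.mem_map.mp hmem
        exact hx (hf hfa ▸ ha)

-- set(filter p xs) = filter p (set(xs))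
theorem ofList_filter {α : Type} [BEq α] [LawfulBEq α] (p : α → Bool) (l : List α) :
    PySem.Set.ofList (l.filter p) = (PySem.Set.ofList l).filter p := by
  induction l using List.reverseRecOn with
  | nil => simp
  | append_singleton l x ih =>
      rw [List.filter_append, PySem.Set.ofList_append_singleton]
      by_cases hp : p x = true
      · simp only [List.filter_singleton, hp, cond_true]
        rw [PySem.Set.ofList_append_singleton, ih]
        by_cases hx : x ∈ PySem.Set.ofList l
        · rw [PySem.Set.add_of_mem hx, PySem.Set.add_of_mem]
          exact List.mem_filter.mpr ⟨hx, hp⟩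
        · rw [PySem.Set.add_of_not_mem hx, PySem.Set.add_of_not_mem, List.filter_append]
          · simp [hp]
          · intro hmem
            exact hx (List.mem_filter.mp hmem).1
      · simp only [List.filter_singleton, hp, cond_false, List.append_nil, ih]
        by_cases hx : x ∈ PySem.Set.ofList l
        · rw [PySem.Set.add_of_mem hx]
        · rw [PySem.Set.add_of_not_mem hx, List.filter_append]
          simp [hp]

-- converse of perm_of_mem_permutations: every rearrangement is produced
theorem mem_permutations_of_perm :
    ∀ (p ys : List Char), p.Perm ys → p ∈ PySem.List.permutations ys ys.length := by
  intro p
  induction p with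
  | nil =>
      intro ys h
      have : ys = [] := h.symm.eq_nil
      subst this
      simp [PySem.List.permutations_zero]
  | cons c p ih =>
      intro ys h
      have hc : c ∈ ys := h.subset (List.mem_cons_self ..)
      obtain ⟨i, hi, hig⟩ := List.mem_iff_getElem.mp hc
      have h2 : ys[i]? = some c := by rw [List.getElem?_eq_getElem hi, hig]
      have hper : (c :: ys.eraseIdx i).Perm ys := PySem.List.perm_cons_eraseIdx ys h2
      have hp : p.Perm (ys.eraseIdx i) := (h.trans hper.symm).cons_inv
      have hlen : ys.length = p.length + 1 := by
        rw [← h.length_eq]; simp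
      have hel : (ys.eraseIdx i).length = p.length := by
        rw [List.length_eraseIdx]
        simp only [hi, if_pos]
        omega
      have him := ih (ys.eraseIdx i) hp
      rw [hel] at him
      rw [hlen, PySem.List.permutations_succ]
      refine List.mem_flatMap.mpr ⟨i, List.mem_range.mpr hi, ?_⟩
      rw [h2]
      exact List.mem_map.mpr ⟨p, him, rfl⟩

-- the flatMap normal form of distinctPerms on a nonempty list
theorem distinctPerms_eq_flatMap (chars : List Char) (h : ¬ chars.isEmpty) :
    distinctPerms chars =
      (List.range chars.length).flatMap
        (fun j => if chars.getD j ' ' ∈ chars.take j then []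
                  else (distinctPerms (chars.eraseIdx j)).map (chars.getD j ' ' :: ·)) := by
  rw [distinctPerms, if_neg h]
  have hstep :
      (fun (out : List (List Char)) (i : {x // x ∈ List.range chars.length}) =>
        let c := chars.getD i.1 ' '
        if c ∈ chars.take i.1 then out
        else out ++ (distinctPerms (chars.eraseIdx i.1)).map (c :: ·)) =
      (fun out i => out ++
        (if chars.getD i.1 ' ' ∈ chars.take i.1 then []
         else (distinctPerms (chars.eraseIdx i.1)).map (chars.getD i.1 ' ' :: ·))) := by
    funext out i
    dsimp only
    split <;> simp
  rw [hstep, PySem.List.foldl_append_eq_flatMap, List.nil_append]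
  conv_rhs => rw [← List.attach_map_subtype_val (List.range chars.length)]
  rw [List.flatMap_map]

-- deduplicating a concatenation of blocks, where every block is either entirely
-- contained in the earlier blocks (and is dropped) or disjoint from them (and is kept
-- deduplicated)
theorem ofList_flatMap_blocks (f g : Nat → List (List Char)) :
    ∀ (k : Nat),
      (∀ j, j < k →
        ((∀ y ∈ PySem.Set.ofList (f j), y ∈ (List.range j).flatMap f) ∧ g j = []) ∨
        ((∀ y ∈ PySem.Set.ofList (f j), y ∉ (List.range j).flatMap f) ∧
          g j = PySem.Set.ofList (f j))) →
      PySem.Set.ofList ((List.range k).flatMap f) = (List.range k).flatMap g := by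
  intro k
  induction k with
  | zero => intro _; simp
  | succ k ih =>
      intro hfg
      rw [List.range_succ, List.flatMap_append, List.flatMap_append,
        List.flatMap_cons, List.flatMap_nil, List.flatMap_cons, List.flatMap_nil,
        List.append_nil, List.append_nil, PySem.Set.ofList_append,
        PySem.Set.update_eq_append_filter]
      rcases hfg k (Nat.lt_succ_self k) with ⟨hsub, hg⟩ | ⟨hdis, hg⟩
      · have hnil : List.filter
            (fun y => !(PySem.Set.ofList ((List.range k).flatMap f)).contains y)
            (PySem.Set.ofList (f k)) = [] := by
          refine List.filter_eq_nil_iff.mpr (fun y hy => ?_)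
          have hmem : y ∈ PySem.Set.ofList ((List.range k).flatMap f) :=
            (PySem.Set.mem_ofList _ _).mpr (hsub y hy)
          simpa using hmem
        rw [hnil, List.append_nil, hg, List.append_nil]
        exact ih (fun j hj => hfg j (Nat.lt_succ_of_lt hj))
      · have hself : List.filter
            (fun y => !(PySem.Set.ofList ((List.range k).flatMap f)).contains y)
            (PySem.Set.ofList (f k)) = PySem.Set.ofList (f k) := by
          refine List.filter_eq_self.mpr (fun y hy => ?_)
          have hnm : y ∉ PySem.Set.ofList ((List.range k).flatMap f) := by
            intro hmem
            exact hdis y hy ((PySem.Set.mem_ofList _ _).mp hmem)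
          simpa using hnm
        rw [hself, hg, ih (fun j hj => hfg j (Nat.lt_succ_of_lt hj))]

-- key lemma: set(itertools.permutations(xs)) = _distinct_perms(xs), including order
theorem ofList_permutations :
    ∀ (n : Nat) (xs : List Char), xs.length = n →
      PySem.Set.ofList (PySem.List.permutations xs n) = distinctPerms xs := by
  intro n
  induction n using Nat.strong_induction_on with
  | _ n IH =>
    intro xs hxs
    match n, hxs with
    | 0, hxs =>
        have hx : xs = [] := List.length_eq_zero_iff.mp hxs
        subst hx
        rw [PySem.List.permutations_zero, distinctPerms]
        decide
    | (m+1), hxs =>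
        have hne : ¬ xs.isEmpty := by
          cases xs with
          | nil => simp at hxs
          | cons a l => simp
        rw [PySem.List.permutations_succ, distinctPerms_eq_flatMap xs hne]
        apply ofList_flatMap_blocks
        intro j hj
        have hjl : j < xs.length := hj
        have hgj : xs[j]? = some xs[j] := List.getElem?_eq_getElem hjl
        have hgd : xs.getD j ' ' = xs[j] := List.getD_eq_getElem xs ' ' hjl
        have hejl : (xs.eraseIdx j).length = m := by
          rw [List.length_eraseIdx]
          simp only [hjl, if_pos]
          omega
        by_cases hdup : xs[j] ∈ xs.take j
        · left
          constructor
          · intro y hy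
            rw [PySem.Set.mem_ofList] at hy
            simp only [hgj] at hy
            obtain ⟨p, hp, rfl⟩ := List.mem_map.mp hy
            -- find the earlier index with the same character
            obtain ⟨i, hi, hig⟩ := List.mem_iff_getElem.mp hdup
            have hitake : i < j := by
              have := hi
              simp [List.length_take] at this
              omega
            have hil : i < xs.length := Nat.lt_trans hitake hjl
            rw [List.getElem_take] at hig
            -- p is a permutation of xs.eraseIdx j, hence of xs.eraseIdx i
            have hpp : p.Perm (xs.eraseIdx j) := by
              have := PySem.List.perm_of_mem_permutations (xs := xs.eraseIdx j) (p := p)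
              rw [hejl] at this
              exact this hp
            have e1 : (xs[j] :: xs.eraseIdx j).Perm xs :=
              PySem.List.perm_cons_eraseIdx xs hgj
            have e2 : (xs[j] :: xs.eraseIdx i).Perm xs := by
              have : xs[i]? = some xs[j] := by
                rw [List.getElem?_eq_getElem hil, hig]
              exact PySem.List.perm_cons_eraseIdx xs this
            have hpi : p.Perm (xs.eraseIdx i) := hpp.trans (e1.trans e2.symm).cons_inv
            have heil : (xs.eraseIdx i).length = m := by
              rw [List.length_eraseIdx]
              simp only [hil, if_pos]
              omega
            have hmem : p ∈ PySem.List.permutations (xs.eraseIdx i) m := by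
              have := mem_permutations_of_perm p (xs.eraseIdx i) hpi
              rw [heil] at this
              exact this
            refine List.mem_flatMap.mpr ⟨i, List.mem_range.mpr hitake, ?_⟩
            have : xs[i]? = some xs[j] := by
              rw [List.getElem?_eq_getElem hil, hig]
            rw [this]
            exact List.mem_map.mpr ⟨p, hmem, rfl⟩
          · rw [hgd, if_pos hdup]
        · right
          constructor
          · intro y hy hmem
            rw [PySem.Set.mem_ofList] at hy
            simp only [hgj] at hy
            obtain ⟨p, hp, rfl⟩ := List.mem_map.mp hy
            obtain ⟨i, hir, hyi⟩ := List.mem_flatMap.mp hmem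
            rw [List.mem_range] at hir
            have hil : i < xs.length := Nat.lt_trans hir hjl
            rw [List.getElem?_eq_getElem hil] at hyi
            obtain ⟨q, _, heq⟩ := List.mem_map.mp hyi
            have hch : xs[i] = xs[j] := (List.cons_eq_cons.mp heq).1
            apply hdup
            have hit : i < (xs.take j).length := by
              simp [List.length_take]
              omega
            have : (xs.take j)[i] = xs[j] := by
              rw [List.getElem_take]
              exact hch
            exact this ▸ List.getElem_mem hit
          · simp only [hgj]
            rw [hgd, if_neg hdup,
              ofList_map_inj _ List.cons_injective,
              IH m (Nat.lt_succ_self m) (xs.eraseIdx j) hejl]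

-- one inner loop (add word if key) written as a Set.update of a filtered map
theorem inner_loop_eq (p : String → Bool) (l : List (List Char)) (s : PySem.Set String) :
    l.foldl
      (fun set_words w =>
        let word := String.ofList w
        if p word then PySem.Set.add set_words word else set_words) s =
    PySem.Set.update s ((l.map String.ofList).filter p) := by
  have h1 : (l.map String.ofList).foldl
        (fun set_words x => if p x then PySem.Set.add set_words x else set_words) s =
      l.foldl
        (fun set_words w =>
          let word := String.ofList w
          if p word then PySem.Set.add set_words word else set_words) s := by
    rw [List.foldl_map]
  rw [← h1, PySem.List.foldl_if_eq_foldl_filter p PySem.Set.add, ← PySem.Set.update_eq_foldl]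

-- per combo value the two loops build the same set
theorem per_value_eq (p : String → Bool) (xs : List Char) (s : PySem.Set String) :
    PySem.Set.update s (((PySem.List.permutations xs xs.length).map String.ofList).filter p) =
    PySem.Set.update s (((distinctPerms xs).map String.ofList).filter p) := by
  rw [← update_ofList, ofList_filter,
    ofList_map_inj String.ofList (fun a b h => by simpa [String.toList_ofList] using congrArg String.toList h),
    ofList_permutations xs.length xs rfl]

-- a value whose letter signature matches no dictionary key contributes nothing to A's set
theorem no_anagram_eq (d : List (String × String)) (xs : List Char) (s : PySem.Set String)
    (h : PySem.Set.contains
      (d.foldl (fun sigs kv => PySem.Set.add sigs (sigOf kv.1)) PySem.Set.empty)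
      (sigOfChars xs) = false) :
    PySem.Set.update s (((PySem.List.permutations xs xs.length).map String.ofList).filter
      (fun x => PySem.Dict.contains (PySem.Dict.mk d) x)) = s := by
  have hfil : ((PySem.List.permutations xs xs.length).map String.ofList).filter
      (fun x => PySem.Dict.contains (PySem.Dict.mk d) x) = [] := by
    refine List.filter_eq_nil_iff.mpr (fun y hy hp => ?_)
    obtain ⟨w, hw, rfl⟩ := List.mem_map.mp hy
    -- the word is a dictionary key …
    rw [PySem.Dict.contains_eq_decide_mem_keys] at hp
    have hk : String.ofList w ∈ (PySem.Dict.mk d).keys := by simpa using hp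
    have hkv : ∃ kv ∈ d, kv.1 = String.ofList w := by
      simpa [PySem.Dict.keys] using hk
    obtain ⟨kv, hkvd, hkve⟩ := hkv
    -- … so its signature, which is the value's signature, is in sigs
    have hsig : sigOf (String.ofList w) = sigOfChars xs := by
      unfold sigOf sigOfChars
      rw [String.toList_ofList,
        PySem.List.sorted_eq_sorted_of_perm w xs (fun c => c) (fun a b hab => hab)
          (PySem.List.perm_of_mem_permutations hw)]
    have hmem : sigOfChars xs ∈
        d.foldl (fun sigs kv => PySem.Set.add sigs (sigOf kv.1)) PySem.Set.empty := by
      refine (PySem.Set.mem_foldl_add d (fun kv => sigOf kv.1) _ _).mpr ?_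
      exact Or.inr ⟨kv, hkvd, by rw [hkve, hsig]⟩
    rw [(PySem.Set.contains_iff _ _).mpr hmem] at h
    exact Bool.true_eq_false ▸ h
  rw [hfil]
  rfl

-- ===== VERDICT (by name: the statement is the Claim_ definition above) =====
theorem generate_words_spec : Claim_equal_generate_words := by
  intro combo d _
  unfold Spec_generate_words generate_words generate_words_alt
  simp only []
  congr 1
  funext s value
  by_cases hs : PySem.Set.contains
      (d.foldl (fun sigs kv => PySem.Set.add sigs (sigOf kv.1)) PySem.Set.empty)
      (sigOf value) = true
  · rw [if_pos hs, inner_loop_eq, inner_loop_eq, per_value_eq]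
  · rw [if_neg hs, inner_loop_eq]
    exact no_anagram_eq d value.toList s (Bool.not_eq_true _ ▸ hs)
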